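-- pv_equiv track=rewrite | github.com/pypi-data/pypi-mirror-391 | packages/molass-legacy/molass_legacy-0.3.4.tar.gz/molass_legacy-0.3.4/molass_legacy/Synthesizer/ErrorLogCheck.py | all_known_errors
-- ===== SOURCE A (Python) =====
-- def findall(p, s):
--     '''Yields all the positions of
--     the pattern p in the string s.'''
--     i = s.find(p)
--     while i != -1:
--         yield i
--         i = s.find(p, i+1)
--
-- def all_known_errors(buffer):
--     error_count = 0
--     for i in findall("ERROR", buffer):
--         error_count += 1
--
--     known_error_count= 0
--     for i in findall("ERROR,root,No counter info", buffer):
--         known_error_count += 1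
--
--     return error_count == known_error_count
-- ===== SOURCE B (Python) =====
-- def all_known_errors(buffer):
--     known = "ERROR,root,No counter info"
--     return all(buffer.startswith(known, i)
--                for i in range(len(buffer)) if buffer.startswith("ERROR", i))
-- ===== Notes on version B (the rewrite author's own statement) =====
-- stated objective: simpler
-- what changed: Replaces the two find-loop counting scans plus count comparison by a single all-match pass: at every position where 'ERROR' starts, check it starts the known-error string, with early exit via all(); valid because known-error occurrences are exactly the ERROR occurrences followed by ',root,No counter info'.
import Mathlib
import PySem

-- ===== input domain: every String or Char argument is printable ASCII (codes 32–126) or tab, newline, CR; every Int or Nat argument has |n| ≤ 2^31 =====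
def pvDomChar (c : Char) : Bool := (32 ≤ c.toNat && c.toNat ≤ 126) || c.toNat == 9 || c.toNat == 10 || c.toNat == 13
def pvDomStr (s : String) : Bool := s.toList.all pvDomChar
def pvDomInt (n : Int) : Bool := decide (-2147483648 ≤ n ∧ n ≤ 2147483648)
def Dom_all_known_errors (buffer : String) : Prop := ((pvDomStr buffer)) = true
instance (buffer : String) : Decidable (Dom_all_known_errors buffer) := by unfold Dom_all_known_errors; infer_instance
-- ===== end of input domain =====

-- B replaces A's two counting scans and count comparison by one all-match pass with early exit (simpler).

-- ===== PORT A =====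
-- the findall generator + counting for-loop, fused into one counting recursion (fuel makes the
-- find loop total; the loop runs at most s.length+1 times since find positions strictly increase)
def findallCount (p s : List Char) (k : Nat) : Nat → Nat
  | 0 => 0
  | fuel + 1 =>
    let i := PySem.Chars.findFrom s p (k : Int) none
    if i = -1 then 0 else 1 + findallCount p s (i.toNat + 1) fuel

def all_known_errors (buffer : String) : Bool :=
  let s := buffer.toList
  let error_count := findallCount "ERROR".toList s 0 (s.length + 1)
  let known_error_count := findallCount "ERROR,root,No counter info".toList s 0 (s.length + 1)
  decide (error_count = known_error_count)

-- ===== PORT B =====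
def all_known_errors_alt (buffer : String) : Bool :=
  let s := buffer.toList
  let known := "ERROR,root,No counter info".toList
  (List.range s.length).all (fun i =>
    !(PySem.Chars.startswith (s.drop i) "ERROR".toList)
      || PySem.Chars.startswith (s.drop i) known)

-- ===== PRECONDITION & SPEC =====
def Spec_all_known_errors (buffer : String) (out : Bool) : Prop := out = all_known_errors_alt buffer
instance (buffer : String) (out : Bool) : Decidable (Spec_all_known_errors buffer out) := by unfold Spec_all_known_errors; infer_instance

-- ===== CLAIM (what is proved, stated in full; the proofs are below) =====
def Claim_equal_all_known_errors : Prop := ∀ (buffer : String), Dom_all_known_errors buffer → Spec_all_known_errors buffer (all_known_errors buffer)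

-- ===== LEMMAS AND PROOFS =====

-- A's find loop from start k counts exactly the occurrence positions j ≥ k.
lemma findallCount_eq (p s : List Char) (hp : p ≠ []) :
    ∀ (fuel k : Nat), k ≤ s.length → s.length - k < fuel →
      findallCount p s k fuel =
        ((Finset.range s.length).filter (fun j => k ≤ j ∧ p <+: s.drop j)).card := by
  intro fuel
  induction fuel with
  | zero => intro k hk hlt; omega
  | succ fuel ih =>
    intro k hk hlt
    by_cases h : PySem.Chars.findFrom s p (k : Int) none = -1
    · have hno : ¬ p <:+: s.drop k :=
        (PySem.Chars.findFrom_natCast_eq_neg_one_iff s p k hk).mp h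
      simp only [findallCount, h, if_pos]
      symm
      rw [Finset.card_eq_zero, Finset.filter_eq_empty_iff]
      rintro j hj ⟨hkj, hpre⟩
      apply hno
      have : p <+: (s.drop k).drop (j - k) := by
        rw [List.drop_drop]
        have hkj' : k + (j - k) = j := by omega
        rwa [hkj']
      have : ∃ m, p <+: (s.drop k).drop m := ⟨j - k, this⟩
      exact (PySem.Chars.isIn_iff_infix p (s.drop k)).mp
        ((PySem.Chars.exists_prefix_drop_iff_isIn p (s.drop k)).mp this)
    · obtain ⟨hki, hpre, hmin⟩ := PySem.Chars.findFrom_natCast_spec s p k hk h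
      set i := PySem.Chars.findFrom s p (k : Int) none with hi
      set m := i.toNat with hm
      have hmk : k ≤ m := by omega
      have hmlen : m < s.length := by
        have h1 := hpre.length_le
        rw [List.length_drop] at h1
        have h2 : 0 < p.length := List.length_pos_of_ne_nil hp
        omega
      have hrec := ih (m + 1) (by omega) (by omega)
      have hset : ((Finset.range s.length).filter (fun j => k ≤ j ∧ p <+: s.drop j)) =
          insert m ((Finset.range s.length).filter (fun j => m + 1 ≤ j ∧ p <+: s.drop j)) := by
        ext j
        simp only [Finset.mem_filter, Finset.mem_insert, Finset.mem_range]
        constructor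
        · rintro ⟨hjn, hkj, hpj⟩
          rcases lt_trichotomy j m with hlt' | rfl | hgt
          · exact absurd hpj (hmin j hkj hlt')
          · exact Or.inl rfl
          · exact Or.inr ⟨hjn, by omega, hpj⟩
        · rintro (rfl | ⟨hjn, hmj, hpj⟩)
          · exact ⟨hmlen, hmk, hpre⟩
          · exact ⟨hjn, by omega, hpj⟩
      simp only [findallCount, ← hi]
      rw [if_neg h]
      show 1 + findallCount p s (m + 1) fuel = _
      rw [hrec, hset, Finset.card_insert_of_notMem (by simp)]
      omega

-- ===== VERDICT (by name: the statement is the Claim_ definition above) =====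
theorem all_known_errors_spec : Claim_equal_all_known_errors := by
  intro buffer _
  unfold Spec_all_known_errors all_known_errors all_known_errors_alt
  set s := buffer.toList with hs
  set E := "ERROR".toList with hE
  set K := "ERROR,root,No counter info".toList with hK
  have hEK : E <+: K := by decide
  have hEne : E ≠ [] := by decide
  have hKne : K ≠ [] := by decide
  have hA := findallCount_eq E s hEne (s.length + 1) 0 (Nat.zero_le _) (by omega)
  have hB := findallCount_eq K s hKne (s.length + 1) 0 (Nat.zero_le _) (by omega)
  simp only [hA, hB]
  set SE := (Finset.range s.length).filter (fun j => 0 ≤ j ∧ E <+: s.drop j) with hSE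
  set SK := (Finset.range s.length).filter (fun j => 0 ≤ j ∧ K <+: s.drop j) with hSK
  have hsub : SK ⊆ SE := by
    intro j hj
    rw [hSK, Finset.mem_filter] at hj
    rw [hSE, Finset.mem_filter]
    exact ⟨hj.1, hj.2.1, hEK.trans hj.2.2⟩
  rw [Bool.eq_iff_iff]
  rw [decide_eq_true_iff, List.all_eq_true]
  constructor
  · intro hcard j hjmem'
    rw [List.mem_range] at hjmem'
    by_cases hE' : E <+: s.drop j
    · have heq : SK = SE := Finset.eq_of_subset_of_card_le hsub (le_of_eq hcard)
      have hjE : j ∈ SE := by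
        rw [hSE, Finset.mem_filter, Finset.mem_range]
        exact ⟨hjmem', Nat.zero_le _, hE'⟩
      rw [← heq, hSK, Finset.mem_filter] at hjE
      have hb : PySem.Chars.startswith (s.drop j) K = true :=
        (PySem.Chars.startswith_iff _ _).mpr hjE.2.2
      simp [hb]
    · have ha : PySem.Chars.startswith (s.drop j) E = false := by
        rw [Bool.eq_false_iff]
        intro hx
        exact hE' ((PySem.Chars.startswith_iff _ _).mp hx)
      simp [ha]
  · intro hall
    have heq : SE = SK := by
      apply Finset.Subset.antisymm _ hsub
      intro j hj
      rw [hSE, Finset.mem_filter, Finset.mem_range] at hj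
      rw [hSK, Finset.mem_filter, Finset.mem_range]
      have hj2 := hall _ (List.mem_range.mpr hj.1)
      have ha : PySem.Chars.startswith (s.drop j) E = true :=
        (PySem.Chars.startswith_iff _ _).mpr hj.2.2
      rw [ha] at hj2
      simp only [Bool.not_true, Bool.false_or] at hj2
      exact ⟨hj.1, Nat.zero_le _, (PySem.Chars.startswith_iff _ _).mp hj2⟩
    rw [heq]
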